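-- pv_equiv track=rewrite | github.com/stoyaneft/textrank | summarizer.py | _words_to_vector
-- ===== SOURCE A (Python) =====
-- def _words_to_vector(words, all_words, word_to_index):
--     vector = [0] * len(all_words)
--     for word in words:
--         if word[0] in 'hufflepuffgryffindorravenclawslytherinhogwarts':
--             vector[word_to_index[word]] += 3
--         else:
--             vector[word_to_index[word]] += 1
--     return vector
-- ===== SOURCE B (Python) =====
-- def _words_to_vector(words, all_words, word_to_index):
--     # Phase 1: count each distinct word once.
--     counts = {}
--     for w in words:
--         counts[w] = counts.get(w, 0) + 1
--     # Phase 2: one weighted update per distinct word.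
--     vector = [0] * len(all_words)
--     for w, c in counts.items():
--         weight = 3 if w[0] in 'hufflepuffgryffindorravenclawslytherinhogwarts' else 1
--         vector[word_to_index[w]] += c * weight
--     return vector
-- ===== Notes on version B (the rewrite author's own statement) =====
-- stated objective: alternative
-- what changed: B replaces A's one-update-per-token loop by a two-phase count-then-aggregate scheme: it first builds a word->count dict in one pass and then performs a single weighted update (count * weight) per distinct word.
import Mathlib
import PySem

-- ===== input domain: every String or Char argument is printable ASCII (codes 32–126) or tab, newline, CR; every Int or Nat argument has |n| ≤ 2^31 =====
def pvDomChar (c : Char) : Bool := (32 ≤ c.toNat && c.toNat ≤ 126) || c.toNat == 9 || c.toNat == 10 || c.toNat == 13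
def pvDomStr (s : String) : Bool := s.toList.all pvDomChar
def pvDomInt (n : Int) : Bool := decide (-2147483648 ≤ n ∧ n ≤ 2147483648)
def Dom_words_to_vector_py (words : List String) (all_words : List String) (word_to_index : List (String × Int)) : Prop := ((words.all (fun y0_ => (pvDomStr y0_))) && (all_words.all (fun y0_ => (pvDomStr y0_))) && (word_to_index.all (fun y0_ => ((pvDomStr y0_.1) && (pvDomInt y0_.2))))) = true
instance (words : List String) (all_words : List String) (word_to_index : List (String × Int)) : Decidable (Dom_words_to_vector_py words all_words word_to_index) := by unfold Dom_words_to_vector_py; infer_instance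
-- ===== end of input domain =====

-- B replaces A's one-update-per-token loop by a two-phase count-then-aggregate scheme
-- (count each distinct word first, then one weighted update count*weight per distinct word);
-- objective: alternative decomposition, same asymptotic cost. Return value only; no mutation is observable.

-- shared helpers: each one transcribes a Python expression that appears verbatim in BOTH Source A and Source B
-- 'hufflepuffgryffindorravenclawslytherinhogwarts' as a list of chars
def pvHouseChars : List Char := "hufflepuffgryffindorravenclawslytherinhogwarts".toList
-- "word[0] in '…'": word[0] is a 1-char string, substring test; total form, exact when word ≠ "" (Pre_)
def pvIsHouse (word : String) : Bool :=
  PySem.Chars.isIn [(PySem.Str.pyGet? word 0).getD ' '] pvHouseChars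
-- "word_to_index[word]": dict lookup, first match per the assoc-list convention; default 0 unreachable under Pre_
def pvIdxD (m : List (String × Int)) (w : String) : Int :=
  ((m.find? (fun p => p.1 == w)).map (·.2)).getD 0
-- "vector[i] += a": total form, exact when Raise.InRange (Pre_)
def pvAddAt (v : List Int) (i : Int) (a : Int) : List Int :=
  PySem.List.pySetD v i (PySem.List.pyGetD v i 0 + a)

-- ===== PORT A =====
def words_to_vector_py (words : List String) (all_words : List String) (word_to_index : List (String × Int)) : List Int :=
  -- vector = [0] * len(all_words); for word in words: if word[0] in '…': vector[…] += 3 else: vector[…] += 1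
  words.foldl
    (fun vector word =>
      if pvIsHouse word then pvAddAt vector (pvIdxD word_to_index word) 3
      else pvAddAt vector (pvIdxD word_to_index word) 1)
    (List.replicate all_words.length 0)

-- ===== PORT B =====
def words_to_vector_py_alt (words : List String) (all_words : List String) (word_to_index : List (String × Int)) : List Int :=
  -- counts = {}; for w in words: counts[w] = counts.get(w, 0) + 1
  let counts : PySem.Dict String Int :=
    words.foldl (fun d w => d.insert w (d.getD w 0 + 1)) PySem.Dict.empty
  -- vector = [0] * len(all_words); for w, c in counts.items(): vector[…] += c * weight
  counts.items.foldl
    (fun vector p =>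
      let weight : Int := if pvIsHouse p.1 then 3 else 1
      pvAddAt vector (pvIdxD word_to_index p.1) (p.2 * weight))
    (List.replicate all_words.length 0)

-- ===== PRECONDITION & SPEC =====
-- Pre_ = exactly the inputs where Python A returns: every word is nonempty (else IndexError on word[0]),
-- is a key of word_to_index (else KeyError), and its index is in range for vector (else IndexError).
def Pre_words_to_vector_py (words : List String) (all_words : List String) (word_to_index : List (String × Int)) : Prop :=
  ∀ w ∈ words, w ≠ "" ∧
    (((word_to_index.find? (fun p => p.1 == w)).map (·.2)).any
      (fun i => decide (-(all_words.length : Int) ≤ i ∧ i < all_words.length))) = true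
instance (words : List String) (all_words : List String) (word_to_index : List (String × Int)) : Decidable (Pre_words_to_vector_py words all_words word_to_index) := by unfold Pre_words_to_vector_py; infer_instance
def pvWitness_words_to_vector_py : List String × List String × (List (String × Int)) :=
  (["harry", "cat", "harry"], ["a", "b"], [("harry", 1), ("cat", 0)])

def Spec_words_to_vector_py (words : List String) (all_words : List String) (word_to_index : List (String × Int)) (out : List Int) : Prop := out = words_to_vector_py_alt words all_words word_to_index
instance (words : List String) (all_words : List String) (word_to_index : List (String × Int)) (out : List Int) : Decidable (Spec_words_to_vector_py words all_words word_to_index out) := by unfold Spec_words_to_vector_py; infer_instance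

-- ===== CLAIM (what is proved, stated in full; the proofs are below) =====
def Claim_equal_words_to_vector_py : Prop := ∀ (words : List String) (all_words : List String) (word_to_index : List (String × Int)), Dom_words_to_vector_py words all_words word_to_index → Pre_words_to_vector_py words all_words word_to_index → Spec_words_to_vector_py words all_words word_to_index (words_to_vector_py words all_words word_to_index)

-- ===== LEMMAS AND PROOFS =====

theorem pvIdx?_lt {n : Nat} {i : Int} {k : Nat} (h : PySem.List.pyIdx? n i = some k) : k < n := by
  unfold PySem.List.pyIdx? at h
  split_ifs at h <;> simp_all <;> omega

theorem pvAddAt_none {v : List Int} {i : Int} (a : Int)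
    (h : PySem.List.pyIdx? v.length i = none) : pvAddAt v i a = v := by
  unfold pvAddAt PySem.List.pySetD PySem.List.pySet? PySem.List.pyGetD PySem.List.pyGet?
  simp [h]

theorem pvAddAt_some {v : List Int} {i : Int} {k : Nat} (a : Int)
    (h : PySem.List.pyIdx? v.length i = some k) :
    pvAddAt v i a = v.set k (v.getD k 0 + a) := by
  have hk := pvIdx?_lt h
  unfold pvAddAt PySem.List.pySetD PySem.List.pySet? PySem.List.pyGetD PySem.List.pyGet?
  simp [h, List.getD, List.getElem?_eq_getElem hk]

theorem pvAddAt_comm (v : List Int) (i j a b : Int) :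
    pvAddAt (pvAddAt v i a) j b = pvAddAt (pvAddAt v j b) i a := by
  cases hi : PySem.List.pyIdx? v.length i with
  | none =>
      rw [pvAddAt_none a hi]
      cases hj : PySem.List.pyIdx? v.length j with
      | none => rw [pvAddAt_none b hj]; exact (pvAddAt_none a hi).symm
      | some l =>
          rw [pvAddAt_some b hj, pvAddAt_none a (by rwa [List.length_set])]
  | some k =>
      rw [pvAddAt_some a hi]
      cases hj : PySem.List.pyIdx? v.length j with
      | none =>
          rw [pvAddAt_none b hj, pvAddAt_none b (by rwa [List.length_set]), pvAddAt_some a hi]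
      | some l =>
          have hk := pvIdx?_lt hi
          have hl := pvIdx?_lt hj
          rw [pvAddAt_some b hj,
            pvAddAt_some b (v := v.set k (v.getD k 0 + a)) (by rwa [List.length_set]),
            pvAddAt_some a (v := v.set l (v.getD l 0 + b)) (by rwa [List.length_set])]
          by_cases hkl : k = l
          · subst hkl
            simp [List.getD, hk, List.getElem_set_self, List.set_set]
            ring_nf
          · rw [List.set_comm _ _ (by omega : l ≠ k)]
            have h1 : (v.set l (v.getD l 0 + b)).getD k 0 = v.getD k 0 := by
              simp [List.getD, List.getElem?_set_ne (by omega : l ≠ k)]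
            have h2 : (v.set k (v.getD k 0 + a)).getD l 0 = v.getD l 0 := by
              simp [List.getD, List.getElem?_set_ne (by omega : k ≠ l)]
            rw [h1, h2]

theorem pvAddAt_zero (v : List Int) (i : Int) : pvAddAt v i 0 = v := by
  cases h : PySem.List.pyIdx? v.length i with
  | none => exact pvAddAt_none 0 h
  | some k =>
      have hk := pvIdx?_lt h
      rw [pvAddAt_some 0 h]
      simp [List.getD, List.getElem?_eq_getElem hk, List.set_getElem_self]

theorem pvAddAt_add (v : List Int) (i a b : Int) :
    pvAddAt (pvAddAt v i a) i b = pvAddAt v i (a + b) := by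
  cases h : PySem.List.pyIdx? v.length i with
  | none => rw [pvAddAt_none a h, pvAddAt_none b h, pvAddAt_none (a + b) h]
  | some k =>
      have hk := pvIdx?_lt h
      rw [pvAddAt_some a h, pvAddAt_some b (by rwa [List.length_set]),
        pvAddAt_some (a + b) h]
      simp [List.getD, hk, List.getElem_set_self, List.set_set]
      ring_nf

theorem foldl_replicate_pvAddAt (idx wt : String → Int) (c : Nat) (k : String) (init : List Int) :
    (List.replicate c k).foldl (fun v w => pvAddAt v (idx w) (wt w)) init
      = pvAddAt init (idx k) ((c : Int) * wt k) := by
  induction c generalizing init with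
  | zero => simp [pvAddAt_zero]
  | succ n ih =>
      rw [List.replicate_succ, List.foldl_cons, ih, pvAddAt_add]
      congr 1
      push_cast
      ring

theorem count_flatMap_replicate {α : Type} [DecidableEq α] (s : List α) (hs : s.Nodup)
    (c : α → Nat) (a : α) :
    (s.flatMap (fun k => List.replicate (c k) k)).count a = if a ∈ s then c a else 0 := by
  induction s with
  | nil => simp
  | cons k s ih =>
      rcases List.nodup_cons.mp hs with ⟨hk, hs'⟩
      rw [List.flatMap_cons, List.count_append, List.count_replicate, ih hs']
      by_cases hak : a = k
      · subst hak
        simp [hk]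
      · simp [hak, Ne.symm hak]

theorem perm_flatMap_count (words : List String) :
    words.Perm ((PySem.Set.ofList words).flatMap (fun k => List.replicate (words.count k) k)) := by
  rw [List.perm_iff_count]
  intro a
  rw [count_flatMap_replicate _ (PySem.Set.nodup_ofList words) _ a]
  by_cases h : a ∈ words
  · simp [PySem.Set.mem_ofList, h]
  · simp [PySem.Set.mem_ofList, h, List.count_eq_zero.mpr h]

-- the generic grouping lemma: a per-token bump loop equals one bump of count * weight per distinct token
theorem foldl_pvAddAt_grouped (words : List String) (idx wt : String → Int) (init : List Int) :
    words.foldl (fun v w => pvAddAt v (idx w) (wt w)) init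
      = (PySem.Set.ofList words).foldl
          (fun v k => pvAddAt v (idx k) ((words.count k : Int) * wt k)) init := by
  have hperm := perm_flatMap_count words
  rw [hperm.foldl_eq (rcomm := ⟨fun v w w' => pvAddAt_comm v (idx w) (idx w') (wt w) (wt w')⟩) init]
  generalize (PySem.Set.ofList words) = s
  induction s generalizing init with
  | nil => simp
  | cons k s ih =>
      rw [List.flatMap_cons, List.foldl_append, List.foldl_cons,
        foldl_replicate_pvAddAt idx wt (words.count k) k init, ih]

-- ===== VERDICT (by name: the statement is the Claim_ definition above) =====
theorem words_to_vector_py_spec : Claim_equal_words_to_vector_py := by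
  intro words all_words word_to_index _hDom _hPre
  unfold Spec_words_to_vector_py words_to_vector_py words_to_vector_py_alt
  simp only [PySem.Dict.foldl_insert_getD_add_one_eq_counter, PySem.Dict.items_counter,
    List.foldl_map]
  have hA : (fun (vector : List Int) (word : String) =>
        if pvIsHouse word then pvAddAt vector (pvIdxD word_to_index word) 3
        else pvAddAt vector (pvIdxD word_to_index word) 1)
      = fun v w => pvAddAt v (pvIdxD word_to_index w) (if pvIsHouse w then 3 else 1) := by
    funext v w
    split <;> rfl
  rw [hA, foldl_pvAddAt_grouped words (pvIdxD word_to_index) (fun w => if pvIsHouse w then 3 else 1)]
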